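-- pv_equiv track=rewrite | github.com/jsymons/base-python-curriculum | unit-10-collections-part-3/lesson-5-create-ascii-box/solutions/solution_using_nested_for_loops.py | create_box
-- ===== SOURCE A (Python) =====
-- def create_box(height, width, char):
--     result = ''
--     for h in range(height):
--         line = ''
--         for w in range(width):
--             line += char
--         result += (line + '\n')
--     return result
-- ===== SOURCE B (Python) =====
-- def create_box(height, width, char):
--     if height <= 0:
--         return ''
--     return (char * width + '\n') * height
-- ===== Notes on version B (the rewrite author's own statement) =====
-- stated objective: idiomatic
-- what changed: Replaces the nested char-by-char accumulation loops with closed-form string repetition: one row is char*width and the whole box is (row+'\n')*height, with an early '' return for non-positive height.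
import Mathlib
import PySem

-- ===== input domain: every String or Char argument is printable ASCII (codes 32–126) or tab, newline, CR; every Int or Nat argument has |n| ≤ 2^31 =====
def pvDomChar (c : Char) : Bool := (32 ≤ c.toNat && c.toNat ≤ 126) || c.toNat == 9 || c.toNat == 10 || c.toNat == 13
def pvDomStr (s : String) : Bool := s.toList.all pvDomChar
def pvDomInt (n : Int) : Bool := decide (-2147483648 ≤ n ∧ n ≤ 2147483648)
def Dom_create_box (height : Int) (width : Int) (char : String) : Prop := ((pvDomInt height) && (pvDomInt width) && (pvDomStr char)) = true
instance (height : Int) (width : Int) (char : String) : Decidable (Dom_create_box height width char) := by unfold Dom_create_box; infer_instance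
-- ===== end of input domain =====

-- B replaces the nested char-by-char loops with closed-form string repetition (idiomatic).

-- ===== PORT A =====
-- result/line are built as List Char (PySem string domain); String.ofList wraps at return.
def create_box (height : Int) (width : Int) (char : String) : String :=
  String.ofList <|
    (PySem.List.pyRange 0 height 1).foldl
      (fun result _h =>
        result ++ ((PySem.List.pyRange 0 width 1).foldl (fun line _w => line ++ char.toList) [] ++ ['\n']))
      []

-- ===== PORT B =====
-- (char * width + '\n') * height : Python string repetition is PySem.List.pyRepeat on the char list.
def create_box_alt (height : Int) (width : Int) (char : String) : String :=
  if height ≤ 0 then ""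
  else String.ofList (PySem.List.pyRepeat (PySem.List.pyRepeat char.toList width ++ ['\n']) height)

-- ===== PRECONDITION & SPEC =====
def Spec_create_box (height : Int) (width : Int) (char : String) (out : String) : Prop := out = create_box_alt height width char
instance (height : Int) (width : Int) (char : String) (out : String) : Decidable (Spec_create_box height width char out) := by unfold Spec_create_box; infer_instance

-- ===== CLAIM (what is proved, stated in full; the proofs are below) =====
def Claim_equal_create_box : Prop := ∀ (height : Int) (width : Int) (char : String), Dom_create_box height width char → Spec_create_box height width char (create_box height width char)

-- ===== LEMMAS AND PROOFS =====

/-- A loop that appends the same list each iteration is a flattened replicate. -/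
theorem foldl_const_append {α : Type} (l : List α) :
    ∀ (m : Nat) (init : List α),
      (List.range m).foldl (fun acc _ => acc ++ l) init = init ++ (List.replicate m l).flatten := by
  intro m
  induction m with
  | zero => intro init; simp
  | succ n ih =>
      intro init
      simp [List.range_succ, List.replicate_succ', ih, List.flatten_append]

-- ===== VERDICT (by name: the statement is the Claim_ definition above) =====
theorem create_box_spec : Claim_equal_create_box := by
  intro h w c _
  unfold Spec_create_box create_box create_box_alt PySem.List.pyRepeat
  split_ifs with hle
  · have h0 : (h - 0).toNat = 0 := by omega
    simp only [PySem.List.pyRange_one, h0, List.range_zero, List.map_nil, List.foldl_nil]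
  · rw [PySem.List.pyRange_one, PySem.List.pyRange_one, List.foldl_map, List.foldl_map,
      foldl_const_append, foldl_const_append]
    simp
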